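-- pv_equiv track=rewrite | github.com/miliar/Code_Jam_Webscraper | solutions_python/Problem_55/338.py | solve_rollers
-- ===== SOURCE A (Python) =====
-- def solve_rollers(R,k,gs):
--     if k >= sum(gs):
--         return sum(gs) * R
--
--     start_at = [-1] * len(gs)
--     rev = []
--
--     ng = 0
--     riden = 0
--     while riden < R:
--         if start_at[ng] != -1:
--             break
--         start_at[ng] = riden
--         rides = 0
--         while True:
--             if rides + gs[ng] > k:
--                 break
--             rides += gs[ng]
--             ng = (ng + 1) % len(gs)
--         rev.append(rides)
--         riden += 1
--
--     res = sum(rev)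
--     if riden < R:
--         chain_start = start_at[ng]
--         chain_length = riden - chain_start
--         n_full_chains = int((R - riden) / chain_length)
--         chain_rev = sum(rev[chain_start:])
--         res += chain_rev * n_full_chains
--
--         tail_length = (R - riden) % chain_length
--         res += sum(rev[chain_start:chain_start+tail_length])
--     return res
-- ===== SOURCE B (Python) =====
-- from bisect import bisect_right
--
-- def solve_rollers(R, k, gs):
--     total = sum(gs)
--     if k >= total:
--         return total * R
--     if R <= 0:
--         return 0
--     n = len(gs)
--     # prefix sums of the doubled list: P2[m] = sum of (gs+gs)[:m]
--     P2 = [0] * (2 * n + 1)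
--     for m, g in enumerate(gs + gs):
--         P2[m + 1] = P2[m] + g
--     # per-start run table: boarded[i] riders on one run starting at i, nxt[i] next start
--     boarded = [0] * n
--     nxt = [0] * n
--     for i in range(n):
--         j = bisect_right(P2, k + P2[i], i, i + n)  # first index in [i,i+n) with P2 > k+P2[i]
--         m = j - i - 1 if j > i else 0
--         boarded[i] = P2[i + m] - P2[i]
--         nxt[i] = (i + m) % n
--     # follow the jump function from start 0 with cycle detection
--     seen = {}
--     prefix = [0]  # prefix sums of run values
--     pos = 0
--     while pos not in seen and len(prefix) - 1 < R:
--         seen[pos] = len(prefix) - 1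
--         prefix.append(prefix[-1] + boarded[pos])
--         pos = nxt[pos]
--     t = len(prefix) - 1
--     if t == R:
--         return prefix[t]
--     cs = seen[pos]
--     clen = t - cs
--     csum = prefix[t] - prefix[cs]
--     full, rem = divmod(R - t, clen)
--     return prefix[t] + csum * full + (prefix[cs + rem] - prefix[cs])
-- ===== Notes on version B (the rewrite author's own statement) =====
-- stated objective: alternative
-- what changed: Instead of re-simulating every run group-by-group with a modular while-loop, B builds prefix sums of the doubled group list, finds each start's whole-run boarded count and next start by binary search (a jump table), and then follows the jump table once with dict-based cycle detection and prefix sums of the run values; Pre_ restricts the simulated case to the natural domain of nonnegative group sizes.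
-- outside the precondition, e.g. on solve_rollers(1, 6, [3, 4, -8, 5, 3, 4]): A returns 3, B returns 4; on solve_rollers(2, -5, [1, -2]): A returns 0, B returns 0; on solve_rollers(2, -1, []): A raises IndexError, B raises IndexError
import Mathlib
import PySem

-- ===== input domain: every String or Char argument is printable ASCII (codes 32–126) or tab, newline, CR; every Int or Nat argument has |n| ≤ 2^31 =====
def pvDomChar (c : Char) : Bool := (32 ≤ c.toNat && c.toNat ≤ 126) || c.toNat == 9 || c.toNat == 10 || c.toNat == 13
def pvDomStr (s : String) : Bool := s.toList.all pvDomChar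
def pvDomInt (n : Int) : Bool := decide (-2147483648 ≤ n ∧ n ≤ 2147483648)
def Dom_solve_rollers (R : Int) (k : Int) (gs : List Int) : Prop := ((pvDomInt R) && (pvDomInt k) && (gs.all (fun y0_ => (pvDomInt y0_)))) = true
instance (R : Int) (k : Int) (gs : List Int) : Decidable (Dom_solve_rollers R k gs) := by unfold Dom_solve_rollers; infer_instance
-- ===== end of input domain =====

-- Alternative algorithm: B replaces A's run-by-run simulation (each run rescans the groups) by prefix
-- sums over the doubled group list + per-start binary search for a whole-run jump table, then one
-- cycle-detected walk over that table.

-- ===== PORT A =====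
-- A's inner 'while True' boarding loop; fuel (n+1) only makes the recursion total — inside Pre_ the loop
-- breaks after at most n iterations, so the fuel is never exhausted.
def pvInnerA (gs : List Int) (k : Int) : Nat → Int → Nat → Int × Nat
  | 0, rides, ng => (rides, ng)
  | fuel + 1, rides, ng =>
      if rides + gs.getD ng 0 > k then (rides, ng)   -- gs[ng]: ng < len gs on every executed path
      else pvInnerA gs k fuel (rides + gs.getD ng 0) ((ng + 1) % gs.length)

-- A's outer 'while riden < R' loop; returns (rev, riden, ng, start_at).  Fuel n+1 again only for totality:
-- each pass marks a fresh position, so at most n passes recurse before the break fires.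
def pvOuterA (gs : List Int) (k R : Int) : Nat → List Int → List Int → Nat → Int → List Int × Int × Nat × List Int
  | 0, sa, rev, ng, riden => (rev, riden, ng, sa)
  | fuel + 1, sa, rev, ng, riden =>
      if riden < R then
        if sa.getD ng (-1) ≠ -1 then (rev, riden, ng, sa)
        else
          let p := pvInnerA gs k (gs.length + 1) 0 ng
          pvOuterA gs k R fuel (sa.set ng riden) (rev ++ [p.1]) p.2 (riden + 1)
      else (rev, riden, ng, sa)

def solve_rollers (R : Int) (k : Int) (gs : List Int) : Int :=
  if k ≥ gs.sum then gs.sum * R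
  else
    let out := pvOuterA gs k R (gs.length + 1) (List.replicate gs.length (-1)) [] 0 0
    let rev := out.1
    let riden := out.2.1
    let ng := out.2.2.1
    let sa := out.2.2.2
    let res := rev.sum
    if riden < R then
      let cs := sa.getD ng (-1)                    -- start_at[ng]
      let clen := riden - cs
      -- int((R - riden) / clen): both operands are positive and < 2^32 here, so Python's float
      -- division followed by int() equals floor division exactly.
      let nfull := PySem.Int.floordiv (R - riden) clen
      let res := res + (PySem.List.slice rev (some cs) none).sum * nfull
      let tail := PySem.Int.mod (R - riden) clen
      res + (PySem.List.slice rev (some cs) (some (cs + tail))).sum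
    else res

-- ===== PORT B =====
-- prefix-sum scan: pvScan a l = [a, a+l0, a+l0+l1, …]  (the P2 building loop of Source B)
def pvScan (a : Int) : List Int → List Int
  | [] => [a]
  | g :: rest => a :: pvScan (a + g) rest

-- bisect.bisect_right(a, x, lo, hi) — CPython's loop, transliterated ((lo+hi)//2 on naturals is exact)
def pvBisect (a : List Int) (x : Int) (lo hi : Nat) : Nat :=
  if h : lo < hi then
    let mid := (lo + hi) / 2
    if x < a.getD mid 0 then pvBisect a x lo mid else pvBisect a x (mid + 1) hi
  else lo
termination_by hi - lo
decreasing_by all_goals omega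

-- one table entry: (boarded[i], nxt[i]) of Source B's precompute loop
def pvRunB (gs : List Int) (k : Int) (P2 : List Int) (i : Nat) : Int × Nat :=
  let j := pvBisect P2 (k + P2.getD i 0) i (i + gs.length)
  let m := if i < j then j - i - 1 else 0
  (P2.getD (i + m) 0 - P2.getD i 0, (i + m) % gs.length)

def pvTable (gs : List Int) (k : Int) : List (Int × Nat) :=
  (List.range gs.length).map (pvRunB gs k (pvScan 0 (gs ++ gs)))

-- Source B's 'while pos not in seen and len(prefix)-1 < R' walk; fuel n+1 only makes it total
def pvWalkB (R : Int) (boarded : List Int) (nxt : List Nat) :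
    Nat → PySem.Dict Int Int → List Int → Nat → PySem.Dict Int Int × List Int × Nat
  | 0, seen, pre, pos => (seen, pre, pos)
  | fuel + 1, seen, pre, pos =>
      if PySem.Dict.contains seen (pos : Int) = false ∧ (pre.length : Int) - 1 < R then
        pvWalkB R boarded nxt fuel
          (PySem.Dict.insert seen (pos : Int) ((pre.length : Int) - 1))
          (pre ++ [pre.getLastD 0 + boarded.getD pos 0])
          (nxt.getD pos 0)
      else (seen, pre, pos)

def solve_rollers_alt (R : Int) (k : Int) (gs : List Int) : Int :=
  let total := gs.sum
  if k ≥ total then total * R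
  else if R ≤ 0 then 0
  else
    let n := gs.length
    let tbl := pvTable gs k
    let boarded := tbl.map (·.1)
    let nxt := tbl.map (·.2)
    let out := pvWalkB R boarded nxt (n + 1) PySem.Dict.empty [0] 0
    let seen := out.1
    let pre := out.2.1
    let pos := out.2.2
    let t : Int := (pre.length : Int) - 1
    if t = R then pre.getD (pre.length - 1) 0
    else
      let cs := (PySem.Dict.get? seen (pos : Int)).getD 0
      let clen := t - cs
      let csum := pre.getD (pre.length - 1) 0 - pre.getD cs.toNat 0
      let full := PySem.Int.floordiv (R - t) clen
      let rem := PySem.Int.mod (R - t) clen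
      pre.getD (pre.length - 1) 0 + csum * full + (pre.getD (cs + rem).toNat 0 - pre.getD cs.toNat 0)

-- ===== PRECONDITION & SPEC =====
-- Pre_ restricts the simulated case to the problem's natural domain of nonnegative group sizes: on lists
-- with a negative group size A still returns (greedily boarding 'negative-size' groups), but B's
-- monotone-prefix-sum binary search is not meant for that regime and can return a different value; Pre_
-- also excludes gs = [] with k < 0 < R, where A raises IndexError (start_at[0] on an empty list).
-- When k ≥ sum(gs) or R ≤ 0 no loop is entered, so those inputs stay admitted for any gs.
def Pre_solve_rollers (R : Int) (k : Int) (gs : List Int) : Prop :=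
  gs.sum ≤ k ∨ R ≤ 0 ∨ ((∀ g ∈ gs, 0 ≤ g) ∧ gs ≠ [])
instance (R : Int) (k : Int) (gs : List Int) : Decidable (Pre_solve_rollers R k gs) := by
  unfold Pre_solve_rollers; infer_instance

def pvWitness_solve_rollers : Int × Int × List Int := (5, 3, [2, 2])

def Spec_solve_rollers (R : Int) (k : Int) (gs : List Int) (out : Int) : Prop := out = solve_rollers_alt R k gs
instance (R : Int) (k : Int) (gs : List Int) (out : Int) : Decidable (Spec_solve_rollers R k gs out) := by unfold Spec_solve_rollers; infer_instance

-- ===== CLAIM (what is proved, stated in full; the proofs are below) =====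
def Claim_equal_solve_rollers : Prop := ∀ (R : Int) (k : Int) (gs : List Int), Dom_solve_rollers R k gs → Pre_solve_rollers R k gs → Spec_solve_rollers R k gs (solve_rollers R k gs)

-- ===== LEMMAS AND PROOFS =====

-- prefix sums of the doubled list, as a function
def pvPfx (gs : List Int) (m : Nat) : Int := ((gs ++ gs).take m).sum

lemma pvScan_length (a : Int) (l : List Int) : (pvScan a l).length = l.length + 1 := by
  induction l generalizing a with
  | nil => simp [pvScan]
  | cons g rest ih => simp [pvScan, ih]

lemma pvScan_getD (a : Int) (l : List Int) (m : Nat) (hm : m ≤ l.length) :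
    (pvScan a l).getD m 0 = a + (l.take m).sum := by
  induction l generalizing a m with
  | nil => obtain rfl := Nat.le_zero.mp (by simpa using hm); simp [pvScan]
  | cons g rest ih =>
      cases m with
      | zero => simp [pvScan]
      | succ m' =>
          simp only [pvScan, List.getD_cons_succ, List.take_succ_cons, List.sum_cons]
          rw [ih (a + g) m' (by simpa using hm)]
          ring

lemma pvScan_append (a : Int) (l : List Int) (r : Int) :
    pvScan a (l ++ [r]) = pvScan a l ++ [a + l.sum + r] := by
  induction l generalizing a with
  | nil => simp [pvScan]
  | cons g rest ih => simp [pvScan, ih, add_assoc]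

lemma pvScan_getLastD (a : Int) (l : List Int) (d : Int) :
    (pvScan a l).getLastD d = a + l.sum := by
  induction l generalizing a d with
  | nil => simp [pvScan]
  | cons g rest ih =>
      show (a :: pvScan (a + g) rest).getLastD d = a + (g :: rest).sum
      rw [List.getLastD_cons, ih]
      simp; ring

lemma pvPfx_mono (gs : List Int) (hnn : ∀ g ∈ gs, 0 ≤ g) {p q : Nat} (h : p ≤ q) :
    pvPfx gs p ≤ pvPfx gs q := by
  have h2 : ∀ g ∈ gs ++ gs, (0:Int) ≤ g := by
    intro g hg; rcases List.mem_append.mp hg with h' | h' <;> exact hnn g h'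
  unfold pvPfx
  rw [show q = p + (q - p) by omega, List.take_add, List.sum_append]
  have : (0:Int) ≤ (((gs ++ gs).drop p).take (q - p)).sum :=
    List.sum_nonneg (fun g hg => h2 g (List.mem_of_mem_drop (List.mem_of_mem_take hg)))
  omega

lemma pvPfx_step (gs : List Int) (t : Nat) (ht : t < 2 * gs.length) :
    pvPfx gs (t + 1) = pvPfx gs t + gs.getD (t % gs.length) 0 := by
  have hlen : t < (gs ++ gs).length := by simp; omega
  have h1 : pvPfx gs (t + 1) = pvPfx gs t + (gs ++ gs).getD t 0 := by
    unfold pvPfx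
    rw [List.take_add_one, List.sum_append]
    simp [List.getD, List.getElem?_eq_getElem hlen]
  rw [h1]
  congr 1
  have hn : 0 < gs.length := by omega
  by_cases h : t < gs.length
  · rw [Nat.mod_eq_of_lt h]
    simp [List.getD, List.getElem?_append_left h]
  · have ht2 : t - gs.length < gs.length := by omega
    have : t % gs.length = t - gs.length := by
      rw [Nat.mod_eq_sub_mod (by omega), Nat.mod_eq_of_lt ht2]
    rw [this]
    simp [List.getD, List.getElem?_append_right (by omega : gs.length ≤ t)]

lemma pvPfx_wrap (gs : List Int) (i : Nat) (hi : i ≤ gs.length) :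
    pvPfx gs (i + gs.length) = pvPfx gs i + gs.sum := by
  unfold pvPfx
  rw [Nat.add_comm i gs.length, List.take_append, List.sum_append,
      List.take_of_length_le (by omega), Nat.add_sub_cancel_left,
      List.take_append_of_le_length hi]
  ring

lemma pvBisect_spec (a : List Int) (x : Int) (lo hi : Nat) (hlh : lo ≤ hi)
    (mono : ∀ p q : Nat, lo ≤ p → p ≤ q → q < hi → a.getD p 0 ≤ a.getD q 0) :
    lo ≤ pvBisect a x lo hi ∧ pvBisect a x lo hi ≤ hi ∧
      (∀ j : Nat, lo ≤ j → j < pvBisect a x lo hi → a.getD j 0 ≤ x) ∧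
      (∀ j : Nat, pvBisect a x lo hi ≤ j → j < hi → x < a.getD j 0) := by
  fun_induction pvBisect a x lo hi with
  | case1 lo hi h mid hlt ih =>
      -- descend left: x < a[mid]
      have hmid1 : lo ≤ mid := by omega
      have hmid2 : mid < hi := by omega
      obtain ⟨ih1, ih2, ih3, ih4⟩ := ih hmid1
        (fun p q hp hq hqm => mono p q hp hq (by omega))
      refine ⟨ih1, by omega, ih3, ?_⟩
      intro j hj1 hj2
      by_cases hjm : j < mid
      · exact ih4 j hj1 hjm
      · calc x < a.getD mid 0 := hlt
          _ ≤ a.getD j 0 := mono mid j hmid1 (by omega) hj2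
  | case2 lo hi h mid hge ih =>
      -- descend right: a[mid] ≤ x
      have hge' : a.getD mid 0 ≤ x := not_lt.mp hge
      have hmid1 : lo ≤ mid := by omega
      have hmid2 : mid < hi := by omega
      obtain ⟨ih1, ih2, ih3, ih4⟩ := ih (by omega)
        (fun p q hp hq hqm => mono p q (by omega) hq hqm)
      refine ⟨by omega, ih2, ?_, ih4⟩
      intro j hj1 hj2
      by_cases hjm : mid + 1 ≤ j
      · exact ih3 j hjm hj2
      · calc a.getD j 0 ≤ a.getD mid 0 := mono j mid hj1 (by omega) hmid2
          _ ≤ x := hge'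
  | case3 lo hi h => exact ⟨le_rfl, by omega, by omega, by omega⟩

-- the jump-table entry computed by Source B equals A's inner boarding loop
lemma pvRun_eq (gs : List Int) (k : Int) (hn : 0 < gs.length) (hnn : ∀ g ∈ gs, 0 ≤ g)
    (hks : k < gs.sum) (i : Nat) (hi : i < gs.length) :
    pvInnerA gs k (gs.length + 1) 0 i = pvRunB gs k (pvScan 0 (gs ++ gs)) i := by
  set n := gs.length with hn_def
  set P2 := pvScan 0 (gs ++ gs) with hP2_def
  have hP2 : ∀ t : Nat, t ≤ 2 * n → P2.getD t 0 = pvPfx gs t := by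
    intro t ht
    rw [hP2_def, pvScan_getD 0 (gs ++ gs) t (by simp; omega)]
    simp [pvPfx]
  have mono : ∀ p q : Nat, i ≤ p → p ≤ q → q < i + n → P2.getD p 0 ≤ P2.getD q 0 := by
    intro p q hp hpq hq
    rw [hP2 p (by omega), hP2 q (by omega)]
    exact pvPfx_mono gs hnn hpq
  set x := k + P2.getD i 0 with hx_def
  set j := pvBisect P2 x i (i + n) with hj_def
  obtain ⟨hj1, hj2, hb2, hb3⟩ := pvBisect_spec P2 x i (i + n) (by omega) mono
  set m := if i < j then j - i - 1 else 0 with hm_def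
  have hxi : x = k + pvPfx gs i := by rw [hx_def, hP2 i (by omega)]
  have hm : m < n := by rw [hm_def]; split <;> omega
  have F1 : ∀ c : Nat, c < m → pvPfx gs (i + c + 1) ≤ k + pvPfx gs i := by
    intro c hc
    have hij : i < j := by by_contra h; rw [hm_def, if_neg h] at hc; omega
    have : i + c + 1 < j := by rw [hm_def, if_pos hij] at hc; omega
    have := hb2 (i + c + 1) (by omega) this
    rwa [hP2 (i + c + 1) (by omega), hxi] at this
  have F2 : k + pvPfx gs i < pvPfx gs (i + m + 1) := by
    by_cases hij : i < j
    · have hjm : i + m + 1 = j := by rw [hm_def, if_pos hij]; omega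
      by_cases hjh : j < i + n
      · have := hb3 j le_rfl hjh
        rw [hP2 j (by omega), hxi] at this
        rwa [hjm]
      · have hjn : j = i + n := by omega
        rw [hjm, hjn, pvPfx_wrap gs i (by omega)]
        omega
    · have hji : j = i := by omega
      have hk0 : x < P2.getD i 0 := hb3 i (by omega) (by omega)
      rw [hP2 i (by omega), hxi] at hk0
      have hkneg : k < 0 := by omega
      have hm0 : m = 0 := by rw [hm_def, if_neg hij]
      have hstep := pvPfx_step gs i (by omega)
      rw [← hn_def] at hstep
      have hge : 0 ≤ gs.getD (i % n) 0 := by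
        rw [Nat.mod_eq_of_lt hi]
        have : gs.getD i 0 ∈ gs := by
          rw [List.getD_eq_getElem?_getD, List.getElem?_eq_getElem hi, Option.getD_some]
          exact List.getElem_mem hi
        exact hnn _ this
      rw [hm0, Nat.add_zero]
      omega
  have key : ∀ (fuel : Nat), ∀ c : Nat, c ≤ m → m - c < fuel →
      pvInnerA gs k fuel (pvPfx gs (i + c) - pvPfx gs i) ((i + c) % n) =
        (pvPfx gs (i + m) - pvPfx gs i, (i + m) % n) := by
    intro fuel
    induction fuel with
    | zero => intro c hc hf; omega
    | succ f ih =>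
        intro c hc hf
        have hg : gs.getD ((i + c) % n) 0 = pvPfx gs (i + c + 1) - pvPfx gs (i + c) := by
          have h' := pvPfx_step gs (i + c) (by omega)
          rw [← hn_def] at h'
          omega
        show pvInnerA gs k (f + 1) (pvPfx gs (i + c) - pvPfx gs i) ((i + c) % n) = _
        rw [pvInnerA]
        by_cases hcm : c = m
        · subst hcm
          rw [if_pos (by rw [hg]; omega)]
        · have hclt : c < m := by omega
          rw [if_neg (by rw [hg]; have := F1 c hclt; omega)]
          have harg : pvPfx gs (i + c) - pvPfx gs i + gs.getD ((i + c) % n) 0 =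
              pvPfx gs (i + (c + 1)) - pvPfx gs i := by
            rw [hg, show i + (c + 1) = i + c + 1 by omega]; ring
          have hmod : ((i + c) % n + 1) % n = (i + (c + 1)) % n := by
            conv_rhs => rw [show i + (c + 1) = (i + c) + 1 by omega, Nat.add_mod]
            simp
          rw [harg, hmod]
          exact ih (c + 1) (by omega) (by omega)
  have top := key (n + 1) 0 (by omega) (by omega)
  simp only [Nat.add_zero, Nat.mod_eq_of_lt hi] at top
  rw [show pvPfx gs i - pvPfx gs i = (0:Int) by ring] at top
  rw [top, pvRunB]
  simp only [← hn_def, ← hx_def, ← hj_def, ← hm_def]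
  rw [hP2 (i + m) (by omega), hP2 i (by omega)]

lemma pvCount_set (l : List Int) (p : Nat) (v : Int) (hp : p < l.length)
    (h : l.getD p (-1) = -1) (hv : v ≠ -1) :
    (l.set p v).count (-1) + 1 = l.count (-1) := by
  have hg : l[p] = -1 := by
    have := h
    rwa [List.getD_eq_getElem?_getD, List.getElem?_eq_getElem hp, Option.getD_some] at this
  have hpos : 0 < l.count (-1) := List.count_pos_iff.mpr (hg ▸ List.getElem_mem hp)
  rw [List.count_set hp]
  simp [hg, hv]
  omega

-- the lockstep invariant between A's outer loop state and Source B's walk state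
def pvInv (gs : List Int) (R : Int) (sa rev : List Int) (ng : Nat) (riden : Int)
    (seen : PySem.Dict Int Int) (pre : List Int) (pos : Nat) : Prop :=
  ng = pos ∧ ng < gs.length ∧ riden = (rev.length : Int) ∧ riden ≤ R ∧
  pre = pvScan 0 rev ∧ sa.length = gs.length ∧
  (∀ p : Nat, p < gs.length →
    PySem.Dict.get? seen (p : Int) = if sa.getD p (-1) = -1 then none else some (sa.getD p (-1))) ∧
  (∀ p : Nat, p < gs.length → sa.getD p (-1) = -1 ∨ (0 ≤ sa.getD p (-1) ∧ sa.getD p (-1) < riden))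

lemma pv_sim (gs : List Int) (k R : Int) (hn : 0 < gs.length) (hnn : ∀ g ∈ gs, 0 ≤ g)
    (hks : k < gs.sum) :
    ∀ (fuel : Nat) (sa rev : List Int) (ng : Nat) (riden : Int)
      (seen : PySem.Dict Int Int) (pre : List Int) (pos : Nat),
      pvInv gs R sa rev ng riden seen pre pos →
      sa.count (-1) < fuel →
      pvInv gs R (pvOuterA gs k R fuel sa rev ng riden).2.2.2
        (pvOuterA gs k R fuel sa rev ng riden).1
        (pvOuterA gs k R fuel sa rev ng riden).2.2.1
        (pvOuterA gs k R fuel sa rev ng riden).2.1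
        (pvWalkB R ((pvTable gs k).map (·.1)) ((pvTable gs k).map (·.2)) fuel seen pre pos).1
        (pvWalkB R ((pvTable gs k).map (·.1)) ((pvTable gs k).map (·.2)) fuel seen pre pos).2.1
        (pvWalkB R ((pvTable gs k).map (·.1)) ((pvTable gs k).map (·.2)) fuel seen pre pos).2.2 ∧
      (¬ (pvOuterA gs k R fuel sa rev ng riden).2.1 < R ∨
        ((pvOuterA gs k R fuel sa rev ng riden).2.2.2).getD
          (pvOuterA gs k R fuel sa rev ng riden).2.2.1 (-1) ≠ -1) := by
  intro fuel
  induction fuel with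
  | zero => intro sa rev ng riden seen pre pos hInv hcount; omega
  | succ f ih =>
      intro sa rev ng riden seen pre pos hInv hcount
      obtain ⟨hng, hnglt, hriden, hRle, hpre, hsalen, hseen, hbound⟩ := hInv
      subst hng
      have hprelen : (pre.length : Int) - 1 = riden := by
        rw [hpre, pvScan_length, hriden]; push_cast; ring_nf
      have hcont : PySem.Dict.contains seen (ng : Int) = ((seen.get? (ng : Int)).isSome) :=
        PySem.Dict.contains_eq_isSome_get? seen (ng : Int)
      by_cases h2 : sa.getD ng (-1) = -1
      · have hcontf : PySem.Dict.contains seen (ng : Int) = false := by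
          rw [hcont, hseen ng hnglt, if_pos h2]; rfl
        by_cases h1 : riden < R
        · -- both loops take a step
          rw [pvOuterA, if_pos h1, if_neg (by simpa using h2),
              pvWalkB, if_pos ⟨hcontf, by rw [hprelen]; exact h1⟩]
          have hrun := pvRun_eq gs k hn hnn hks ng hnglt
          have hb : ((pvTable gs k).map (·.1)).getD ng 0 =
              (pvInnerA gs k (gs.length + 1) 0 ng).1 := by
            rw [pvTable, List.map_map, PySem.List.getD_map_range _ _ _ _ hnglt, hrun]; rfl
          have hx : ((pvTable gs k).map (·.2)).getD ng 0 =
              (pvInnerA gs k (gs.length + 1) 0 ng).2 := by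
            rw [pvTable, List.map_map, PySem.List.getD_map_range _ _ _ _ hnglt, hrun]; rfl
          have hlast : pre.getLastD 0 = rev.sum := by
            rw [hpre, pvScan_getLastD]; ring
          have hnext_lt : (pvInnerA gs k (gs.length + 1) 0 ng).2 < gs.length := by
            rw [hrun, pvRunB]
            exact Nat.mod_lt _ hn
          have hridz : (0:Int) ≤ riden := by rw [hriden]; positivity
          apply ih
          · refine ⟨hx.symm, hnext_lt, ?_, by omega, ?_, by simpa using hsalen, ?_, ?_⟩
            · rw [hriden]; simp
            · rw [hb, hlast, hpre, pvScan_append]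
              norm_num
            · intro p hp
              rw [PySem.Dict.get?_insert]
              by_cases hpp : p = ng
              · subst hpp
                have hset : (sa.set p riden).getD p (-1) = riden := by
                  simp [List.getD_eq_getElem?_getD, hsalen, hp]
                rw [if_pos rfl, hset, if_neg (by omega), hprelen]
              · have hset : (sa.set ng riden).getD p (-1) = sa.getD p (-1) := by
                  simp [List.getD_eq_getElem?_getD, Ne.symm hpp]
                rw [if_neg (by exact_mod_cast hpp), hseen p hp, hset]
            · intro p hp
              by_cases hpp : p = ng
              · subst hpp
                have hset : (sa.set p riden).getD p (-1) = riden := by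
                  simp [List.getD_eq_getElem?_getD, hsalen, hp]
                rw [hset]
                right; omega
              · have hset : (sa.set ng riden).getD p (-1) = sa.getD p (-1) := by
                  simp [List.getD_eq_getElem?_getD, Ne.symm hpp]
                rw [hset]
                rcases hbound p hp with h | h
                · left; exact h
                · right; omega
          · have := pvCount_set sa ng riden (by omega) h2 (by omega)
            omega
        · -- R exhausted: both loops stop
          rw [pvOuterA, if_neg h1, pvWalkB,
              if_neg (by rw [hprelen]; intro hcc; exact h1 hcc.2)]
          exact ⟨⟨rfl, hnglt, hriden, hRle, hpre, hsalen, hseen, hbound⟩, Or.inl h1⟩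
      · -- revisited position: both loops stop
        have hcontt : ¬ (PySem.Dict.contains seen (ng : Int) = false ∧
            ((pre.length : Int) - 1 < R)) := by
          rw [hcont, hseen ng hnglt, if_neg h2]
          intro hcc
          simpa using hcc.1
        rw [pvWalkB, if_neg hcontt]
        by_cases h1 : riden < R
        · rw [pvOuterA, if_pos h1, if_pos (by simpa using h2)]
          exact ⟨⟨rfl, hnglt, hriden, hRle, hpre, hsalen, hseen, hbound⟩, Or.inr h2⟩
        · rw [pvOuterA, if_neg h1]
          exact ⟨⟨rfl, hnglt, hriden, hRle, hpre, hsalen, hseen, hbound⟩, Or.inl h1⟩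

lemma pvSum_drop_take (l : List Int) (a t : Nat) :
    ((l.drop a).take t).sum = (l.take (a + t)).sum - (l.take a).sum := by
  rw [List.take_add, List.sum_append]; ring

-- ===== VERDICT (by name: the statement is the Claim_ definition above) =====
theorem solve_rollers_spec : Claim_equal_solve_rollers := by
  intro R k gs _hdom hpre
  unfold Spec_solve_rollers
  by_cases hks : k ≥ gs.sum
  · rw [solve_rollers, solve_rollers_alt]
    rw [if_pos hks, if_pos hks]
  · by_cases hR : R ≤ 0
    · rw [solve_rollers, solve_rollers_alt]
      rw [if_neg hks, if_neg hks, if_pos hR]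
      have houter : pvOuterA gs k R (gs.length + 1)
          (List.replicate gs.length (-1)) [] 0 0 = ([], 0, 0, List.replicate gs.length (-1)) := by
        rw [pvOuterA, if_neg (by omega)]
      simp only [houter]
      norm_num
      omega
    · push Not at hks hR
      have hnn : ∀ g ∈ gs, 0 ≤ g := by
        rcases hpre with h | h | h
        · omega
        · omega
        · exact h.1
      have hn : 0 < gs.length := by
        rcases hpre with h | h | h
        · omega
        · omega
        · cases gs with
          | nil => exact absurd rfl h.2
          | cons a l => simp
      have hInv0 : pvInv gs R (List.replicate gs.length (-1)) [] 0 0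
          PySem.Dict.empty [0] 0 := by
        refine ⟨rfl, hn, by simp, by omega, rfl, by simp, ?_, ?_⟩
        · intro p hp
          rw [PySem.Dict.get?_empty, if_pos (List.getD_replicate _ hp)]
        · intro p hp
          exact Or.inl (List.getD_replicate _ hp)
      have hcnt : (List.replicate gs.length (-1) : List Int).count (-1) < gs.length + 1 := by
        simp
      obtain ⟨hInvF, hfin⟩ := pv_sim gs k R hn hnn hks (gs.length + 1)
        (List.replicate gs.length (-1)) [] 0 0 PySem.Dict.empty [0] 0 hInv0 hcnt
      set o := pvOuterA gs k R (gs.length + 1) (List.replicate gs.length (-1)) [] 0 0 with ho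
      set w := pvWalkB R ((pvTable gs k).map (·.1)) ((pvTable gs k).map (·.2))
        (gs.length + 1) PySem.Dict.empty [0] 0 with hw
      obtain ⟨hng, hnglt, hriden, hRle, hpre2, hsalen, hseen, hbound⟩ := hInvF
      rw [solve_rollers, solve_rollers_alt]
      simp only [← ho, ← hw]
      have hlen : w.2.1.length = o.1.length + 1 := by rw [hpre2, pvScan_length]
      have hT : ∀ m : Nat, m ≤ o.1.length → w.2.1.getD m 0 = (o.1.take m).sum := by
        intro m hm
        rw [hpre2, pvScan_getD 0 o.1 m hm]
        ring
      have htop : w.2.1.getD (w.2.1.length - 1) 0 = o.1.sum := by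
        rw [hlen, Nat.add_sub_cancel, hT o.1.length le_rfl, List.take_length]
      have htR : (w.2.1.length : Int) - 1 = o.2.1 := by
        rw [hlen, hriden]; push_cast; ring
      by_cases hdone : o.2.1 < R
      · -- cycle case: A's loop stopped on a revisited position
        have hsa : o.2.2.2.getD o.2.2.1 (-1) ≠ -1 := by
          rcases hfin with h | h
          · omega
          · exact h
        rw [if_neg (show ¬ k ≥ gs.sum by omega), if_pos hdone,
            if_neg (show ¬ k ≥ gs.sum by omega), if_neg (show ¬ R ≤ 0 by omega),
            if_neg (show ¬ (w.2.1.length : Int) - 1 = R by omega)]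
        rcases hbound o.2.2.1 hnglt with h | ⟨hcs0, hcslt⟩
        · exact absurd h hsa
        set cs := o.2.2.2.getD o.2.2.1 (-1) with hcs
        have hseenv : (PySem.Dict.get? w.1 (w.2.2 : Int)).getD 0 = cs := by
          rw [← hng, hseen o.2.2.1 hnglt, if_neg hsa]
          rfl
        rw [hseenv, htR, htop]
        set clen := o.2.1 - cs with hclen
        have hclpos : 0 < clen := by omega
        set rem := PySem.Int.mod (R - o.2.1) clen with hrem
        have hrem0 : 0 ≤ rem := PySem.Int.mod_nonneg _ hclpos
        have hremlt : rem < clen := PySem.Int.mod_lt _ hclpos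
        have hcsle : cs.toNat ≤ o.1.length := by omega
        have hcsremle : (cs + rem).toNat ≤ o.1.length := by omega
        have htoNat : (cs + rem).toNat = cs.toNat + rem.toNat := by omega
        rw [hT cs.toNat hcsle, hT (cs + rem).toNat hcsremle,
            PySem.List.slice_from o.1 hcs0,
            PySem.List.slice_toNat o.1 hcs0 (by omega),
            show (cs + rem).toNat - cs.toNat = rem.toNat by omega]
        have hdrop : (o.1.drop cs.toNat).sum = o.1.sum - (o.1.take cs.toNat).sum := by
          have := List.sum_take_add_sum_drop o.1 cs.toNat
          omega
        have hmid : ((o.1.drop cs.toNat).take rem.toNat).sum =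
            (o.1.take (cs.toNat + rem.toNat)).sum - (o.1.take cs.toNat).sum :=
          pvSum_drop_take o.1 cs.toNat rem.toNat
        rw [hdrop, hmid, htoNat]
      · -- A stopped because riden reached R
        rw [if_neg (show ¬ k ≥ gs.sum by omega), if_neg hdone,
            if_neg (show ¬ k ≥ gs.sum by omega), if_neg (show ¬ R ≤ 0 by omega),
            if_pos (show (w.2.1.length : Int) - 1 = R by omega)]
        exact htop.symm
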